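-- pv_equiv track=rewrite | github.com/jlewis200/aoc_19 | 5/solve.py | program_str
-- ===== SOURCE A (Python) =====
-- def program_str(program):
--     string = "\t" + "\t".join("0123456789") + "\n"
--     string += "-" * 90
--
--     for idx, value in enumerate(program):
--
--         if idx % 10 == 0:
--             string += f"\n{idx}:\t{value}"
--         else:
--             string += f"\t{value}"
--
--     return string
-- ===== SOURCE B (Python) =====
-- def program_str(program):
--     lines = ["\t" + "\t".join("0123456789") + "\n" + "-" * 90]
--     for i in range(0, len(program), 10):
--         lines.append(f"\n{i}:\t" + "\t".join(str(v) for v in program[i:i + 10]))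
--     return "".join(lines)
-- ===== Notes on version B (the rewrite author's own statement) =====
-- stated objective: simpler
-- what changed: Replaces the per-element fold with an idx%10 branch by chunking the program into rows of 10 via range(0, len, 10) and slicing, building each row with a tab-join and concatenating all rows at the end.
import Mathlib
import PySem

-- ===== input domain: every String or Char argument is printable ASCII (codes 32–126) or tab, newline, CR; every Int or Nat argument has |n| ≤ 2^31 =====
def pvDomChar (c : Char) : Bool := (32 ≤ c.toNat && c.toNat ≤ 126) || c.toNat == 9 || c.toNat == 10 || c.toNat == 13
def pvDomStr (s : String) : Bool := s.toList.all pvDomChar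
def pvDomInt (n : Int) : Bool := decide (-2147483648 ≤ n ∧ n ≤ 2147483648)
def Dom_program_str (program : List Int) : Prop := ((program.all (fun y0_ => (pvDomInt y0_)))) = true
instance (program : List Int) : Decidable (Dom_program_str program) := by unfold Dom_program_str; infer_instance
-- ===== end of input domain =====

-- B replaces A's per-element fold (with an idx % 10 test) by chunking into rows of 10
-- via range/slicing and joining each row; same return value, simpler decomposition.

-- ===== PORT A =====
def program_str (program : List Int) : String :=
  let string := "\t" ++ PySem.Str.join "\t" ("0123456789".toList.map (fun c => String.ofList [c])) ++ "\n"
  let string := string ++ String.ofList (List.replicate 90 '-')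
  (PySem.List.enumerate program).foldl
    (fun s p =>
      if PySem.Int.mod p.1 10 == 0 then
        s ++ ("\n" ++ PySem.Int.toStr p.1 ++ ":\t" ++ PySem.Int.toStr p.2)
      else
        s ++ ("\t" ++ PySem.Int.toStr p.2)) string

-- ===== PORT B =====
def program_str_alt (program : List Int) : String :=
  let lines := ("\t" ++ PySem.Str.join "\t" ("0123456789".toList.map (fun c => String.ofList [c])) ++ "\n" ++ String.ofList (List.replicate 90 '-'))
    :: (PySem.List.pyRange 0 (PySem.List.len program) 10).map
      (fun i => "\n" ++ PySem.Int.toStr i ++ ":\t" ++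
        PySem.Str.join "\t" ((PySem.List.slice program (some i) (some (i + 10))).map PySem.Int.toStr))
  PySem.Str.join "" lines

-- ===== PRECONDITION & SPEC =====
def Spec_program_str (program : List Int) (out : String) : Prop := out = program_str_alt program
instance (program : List Int) (out : String) : Decidable (Spec_program_str program out) := by unfold Spec_program_str; infer_instance

-- ===== CLAIM (what is proved, stated in full; the proofs are below) =====
def Claim_equal_program_str : Prop := ∀ (program : List Int), Dom_program_str program → Spec_program_str program (program_str program)

-- ===== LEMMAS AND PROOFS =====

-- A's loop body, accumulator factored out
def pvStep (s : String) (p : Int × Int) : String :=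
  if PySem.Int.mod p.1 10 == 0 then
    s ++ ("\n" ++ PySem.Int.toStr p.1 ++ ":\t" ++ PySem.Int.toStr p.2)
  else
    s ++ ("\t" ++ PySem.Int.toStr p.2)

-- the non-leading part of a row
def pvTail : List Int → String
  | [] => ""
  | v :: vs => "\t" ++ PySem.Int.toStr v ++ pvTail vs

-- one row of ≤ 10 values starting at absolute index i
def pvRow (i : Int) (chunk : List Int) : String :=
  "\n" ++ PySem.Int.toStr i ++ ":\t" ++ PySem.Str.join "\t" (chunk.map PySem.Int.toStr)

-- all rows from absolute index i on
def pvRows : Int → List Int → String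
  | _, [] => ""
  | i, x :: xs => pvRow i ((x :: xs).take 10) ++ pvRows (i + 10) ((x :: xs).drop 10)
termination_by _ l => l.length
decreasing_by simp

lemma str_join_cons_cons (sep x y : String) (r : List String) :
    PySem.Str.join sep (x :: y :: r) = x ++ sep ++ PySem.Str.join sep (y :: r) := by
  rw [← String.toList_inj]
  simp [PySem.Str.toList_join, PySem.Chars.join_cons_cons]

lemma str_join_singleton (sep x : String) : PySem.Str.join sep [x] = x := by
  rw [← String.toList_inj]
  simp [PySem.Str.toList_join, PySem.Chars.join_singleton]

lemma str_join_empty_cons (x : String) (xs : List String) :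
    PySem.Str.join "" (x :: xs) = x ++ PySem.Str.join "" xs := by
  cases xs with
  | nil =>
    rw [← String.toList_inj]
    simp [PySem.Str.toList_join, PySem.Chars.join, List.intercalate]
  | cons y r =>
    rw [← String.toList_inj]
    simp [PySem.Str.toList_join, PySem.Chars.join_cons_cons]

lemma str_join_nil (sep : String) : PySem.Str.join sep [] = "" := by
  rw [← String.toList_inj]
  simp [PySem.Str.toList_join, PySem.Chars.join, List.intercalate]

lemma join_tab_eq_tail (v : Int) (vs : List Int) :
    PySem.Str.join "\t" ((v :: vs).map PySem.Int.toStr) = PySem.Int.toStr v ++ pvTail vs := by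
  induction vs generalizing v with
  | nil => simp [str_join_singleton, pvTail]
  | cons y r ih =>
    simp only [List.map_cons] at *
    rw [str_join_cons_cons, ih, pvTail]
    simp [String.append_assoc]

lemma foldl_step_out (es : List (Int × Int)) (s : String) :
    es.foldl pvStep s = s ++ es.foldl pvStep "" := by
  induction es generalizing s with
  | nil => simp
  | cons p es ih =>
    simp only [List.foldl_cons]
    rw [ih (pvStep s p), ih (pvStep "" p)]
    have : pvStep s p = s ++ pvStep "" p := by
      unfold pvStep; split_ifs <;> simp [String.append_assoc]
    rw [this, String.append_assoc]

lemma pvStep_not_dvd (s : String) (n v : Int) (h : ¬ (10 ∣ n)) :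
    pvStep s (n, v) = s ++ ("\t" ++ PySem.Int.toStr v) := by
  unfold pvStep
  have : (PySem.Int.mod n 10 == 0) = false := by
    simpa [PySem.Int.mod_eq_zero_iff_dvd] using h
  rw [this]
  simp

lemma pvStep_dvd (s : String) (n v : Int) (h : 10 ∣ n) :
    pvStep s (n, v) = s ++ ("\n" ++ PySem.Int.toStr n ++ ":\t" ++ PySem.Int.toStr v) := by
  unfold pvStep
  have : (PySem.Int.mod n 10 == 0) = true := by
    simpa [PySem.Int.mod_eq_zero_iff_dvd] using h
  rw [this]
  simp

lemma tail_lemma (vs : List Int) (n : Int)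
    (h : ∀ j : Nat, j < vs.length → ¬ (10 ∣ (n + j))) :
    (PySem.List.enumerate vs n).foldl pvStep "" = pvTail vs := by
  induction vs generalizing n with
  | nil => simp [PySem.List.enumerate_nil, pvTail]
  | cons v vs ih =>
    rw [PySem.List.enumerate_cons, List.foldl_cons, foldl_step_out]
    have h0 : ¬ (10 ∣ n) := by simpa using h 0 (by simp)
    rw [pvStep_not_dvd _ _ _ h0, ih (n + 1) (fun j hj => by
      have := h (j + 1) (by simpa using Nat.succ_lt_succ hj)
      push_cast at this ⊢
      convert this using 2
      omega)]
    simp [pvTail, String.append_assoc]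

lemma pyRange10_cons (a b : Int) (h : a < b) :
    PySem.List.pyRange a b 10 = a :: PySem.List.pyRange (a + 10) b 10 := by
  rw [PySem.List.pyRange_of_pos a b (by norm_num), PySem.List.pyRange_of_pos (a + 10) b (by norm_num)]
  simp only [if_pos h]
  by_cases h2 : a + 10 < b
  · rw [if_pos h2]
    have hc : ((b - a + 10 - 1) / 10).toNat = ((b - (a + 10) + 10 - 1) / 10).toNat + 1 := by omega
    rw [hc, List.range_succ_eq_map]
    simp [List.map_map, Function.comp]
    intro k _
    ring
  · rw [if_neg h2]
    have hc : ((b - a + 10 - 1) / 10).toNat = 1 := by omega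
    rw [hc]
    simp

lemma pyRange10_nil (a b : Int) (h : b ≤ a) : PySem.List.pyRange a b 10 = [] := by
  rw [PySem.List.pyRange_of_pos a b (by norm_num)]
  simp [show ¬ a < b by omega]

lemma chunk_lemma (c : List Int) (k : Nat) (hc : c ≠ []) (hlen : c.length ≤ 10) :
    (PySem.List.enumerate c (10 * (k : Int))).foldl pvStep "" = pvRow (10 * (k : Int)) c := by
  obtain ⟨v, vs, rfl⟩ := List.exists_cons_of_ne_nil hc
  rw [PySem.List.enumerate_cons, List.foldl_cons, foldl_step_out,
    pvStep_dvd _ _ _ ⟨(k : Int), rfl⟩,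
    tail_lemma vs _ (fun j hj hdvd => by
      have h9 : vs.length < 10 := by simpa using hlen
      omega)]
  have hj := join_tab_eq_tail v vs
  simp only [List.map_cons] at hj
  simp [pvRow, hj, String.append_assoc]

lemma A_main (m : Nat) : ∀ (l : List Int) (k : Nat), l.length ≤ m →
    (PySem.List.enumerate l (10 * (k : Int))).foldl pvStep "" = pvRows (10 * (k : Int)) l := by
  induction m with
  | zero =>
    intro l k h
    have hl : l = [] := List.eq_nil_of_length_eq_zero (by omega)
    subst hl
    simp [PySem.List.enumerate_nil, pvRows]
  | succ m ih =>
    intro l k h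
    cases l with
    | nil => simp [PySem.List.enumerate_nil, pvRows]
    | cons x xs =>
      rw [pvRows]
      by_cases h10 : (x :: xs).length ≤ 10
      · rw [List.drop_eq_nil_of_le (by omega), List.take_of_length_le (by omega),
          chunk_lemma _ k (by simp) h10]
        simp [pvRows]
      · have hsplit : x :: xs = (x :: xs).take 10 ++ (x :: xs).drop 10 :=
          (List.take_append_drop _ _).symm
        conv_lhs => rw [hsplit]
        rw [PySem.List.enumerate_append, List.foldl_append, foldl_step_out,
          chunk_lemma _ k (by simp) (by simp)]
        have hlen10 : (((x :: xs).take 10).length : Int) = 10 := by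
          rw [List.length_take]
          simp only [List.length_cons] at h10 ⊢
          omega
        rw [hlen10]
        have hcast : (10 * (k : Int) + 10) = 10 * ((k + 1 : Nat) : Int) := by push_cast; ring
        rw [hcast, ih _ (k + 1) (by simp only [List.length_drop, List.length_cons] at h h10 ⊢; omega)]

lemma B_main (l : List Int) (m : Nat) : ∀ (k : Nat), l.length ≤ 10 * k + m →
    PySem.Str.join "" ((PySem.List.pyRange (10 * (k : Int)) l.length 10).map
      (fun i => "\n" ++ PySem.Int.toStr i ++ ":\t" ++
        PySem.Str.join "\t" ((PySem.List.slice l (some i) (some (i + 10))).map PySem.Int.toStr)))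
    = pvRows (10 * (k : Int)) (l.drop (10 * k)) := by
  induction m with
  | zero =>
    intro k h
    rw [pyRange10_nil _ _ (by omega), List.drop_eq_nil_of_le (by omega)]
    simp [str_join_nil, pvRows]
  | succ m ih =>
    intro k h
    by_cases h10 : l.length ≤ 10 * k
    · rw [pyRange10_nil _ _ (by omega), List.drop_eq_nil_of_le (by omega)]
      simp [str_join_nil, pvRows]
    · rw [pyRange10_cons _ _ (by omega), List.map_cons, str_join_empty_cons]
      have hsl : PySem.List.slice l (some (10 * (k : Int))) (some (10 * (k : Int) + 10))
          = (l.drop (10 * k)).take 10 := by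
        have e1 : (10 * (k : Int)).toNat = 10 * k := by omega
        have e2 : (10 * (k : Int) + 10).toNat = 10 * k + 10 := by omega
        rw [PySem.List.slice_toNat l (by positivity) (by positivity), e1, e2]
        norm_num
      cases hd : l.drop (10 * k) with
      | nil =>
        exfalso
        have := congrArg List.length hd
        simp at this
        omega
      | cons y ys =>
        rw [hsl, hd, pvRows]
        have hdd : (y :: ys).drop 10 = l.drop (10 * (k + 1)) := by
          rw [← hd, List.drop_drop]
          congr 1
        have hcast : (10 * (k : Int) + 10) = 10 * ((k + 1 : Nat) : Int) := by push_cast; ring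
        rw [hdd, hcast, ih (k + 1) (by omega)]
        rfl

-- ===== VERDICT (by name: the statement is the Claim_ definition above) =====
theorem program_str_spec : Claim_equal_program_str := by
  intro program _
  unfold Spec_program_str
  show program_str program = program_str_alt program
  unfold program_str program_str_alt
  rw [show (fun (s : String) (p : Int × Int) =>
      if PySem.Int.mod p.1 10 == 0 then
        s ++ ("\n" ++ PySem.Int.toStr p.1 ++ ":\t" ++ PySem.Int.toStr p.2)
      else
        s ++ ("\t" ++ PySem.Int.toStr p.2)) = pvStep from rfl]
  rw [foldl_step_out, str_join_empty_cons]
  have hA := A_main program.length program 0 le_rfl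
  have hB := B_main program program.length 0 (by omega)
  simp only [Nat.cast_zero, mul_zero, List.drop_zero] at hA hB
  simp only [PySem.List.len_eq]
  rw [hA, hB]
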